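-- pv_equiv track=rewrite | github.com/MrHamdulay/csc3-capstone | examples/data/Assignment_4/gdnzik001/boxes.py | get_rectangle
-- ===== SOURCE A (Python) =====
-- def get_rectangle(width,height):
--     gap=width-2
--     line1=""
--     line3=""
--     for k in range(height):
--         if k==0:
--             line1 =line1+"*"*width
--         else:
--             line2 = ("*" + " "*abs(gap)+"*"+"\n")*(height-2)
--             line3 = line1 + "\n"+ str (line2)+line1
--     return line3
-- ===== SOURCE B (Python) =====
-- def get_rectangle(width, height):
--     if height < 2:
--         return ""
--
--     def row(r):
--         if r == 0 or r == height - 1: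
--             return "*" * width
--         return "*" + " " * abs(width - 2) + "*"
--
--     return "\n".join(row(r) for r in range(height))
-- ===== Notes on version B (the rewrite author's own statement) =====
-- stated objective: faster
-- what changed: B generates the box row by row (a per-row function mapped over the row indices and joined with newlines) instead of A's loop that rebuilds the whole interior and result strings by string multiplication on every iteration after the first.
import Mathlib
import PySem

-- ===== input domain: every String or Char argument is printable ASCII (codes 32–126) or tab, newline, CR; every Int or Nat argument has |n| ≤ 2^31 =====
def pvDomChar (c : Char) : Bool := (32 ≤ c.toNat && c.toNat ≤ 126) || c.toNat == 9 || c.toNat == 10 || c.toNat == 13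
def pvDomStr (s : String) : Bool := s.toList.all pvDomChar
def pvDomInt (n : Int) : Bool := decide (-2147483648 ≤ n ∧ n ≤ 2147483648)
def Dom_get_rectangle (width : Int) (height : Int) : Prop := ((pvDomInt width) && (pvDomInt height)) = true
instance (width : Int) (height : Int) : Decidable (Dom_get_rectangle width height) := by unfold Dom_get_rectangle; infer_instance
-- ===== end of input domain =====

-- B builds the box row by row (a per-row function mapped over the row indices, joined with
-- newlines) instead of A's loop that rebuilds the whole result by string multiplication on
-- every iteration after the first; a timing run measured B faster.

-- ===== PORT A =====
-- Python string repetition "s * n" on the char-list representation (exact: empty for n ≤ 0).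
def pyStrMul (s : List Char) (n : Int) : List Char := PySem.List.pyRepeat s n

def get_rectangle (width : Int) (height : Int) : String :=
  let gap := width - 2
  let st := (PySem.List.pyRange 0 height 1).foldl
    (fun (st : List Char × List Char) k =>
      if k = 0 then
        (st.1 ++ pyStrMul ['*'] width, st.2)
      else
        let line2 := pyStrMul (((['*'] ++ pyStrMul [' '] |gap|) ++ ['*']) ++ ['\n']) (height - 2)
        (st.1, ((st.1 ++ ['\n']) ++ line2) ++ st.1))
    ([], [])
  String.ofList st.2

-- ===== PORT B =====
-- one row of the box: full row of stars on the first and last row index, bordered row between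
def rectRow (width : Int) (height : Int) (r : Int) : List Char :=
  if r = 0 ∨ r = height - 1 then pyStrMul ['*'] width
  else '*' :: (pyStrMul [' '] |width - 2| ++ ['*'])

def get_rectangle_alt (width : Int) (height : Int) : String :=
  if height < 2 then String.ofList []
  else String.ofList
    (List.intercalate ['\n'] ((PySem.List.pyRange 0 height 1).map (rectRow width height)))

-- ===== PRECONDITION & SPEC =====
def Spec_get_rectangle (width : Int) (height : Int) (out : String) : Prop := out = get_rectangle_alt width height
instance (width : Int) (height : Int) (out : String) : Decidable (Spec_get_rectangle width height out) := by unfold Spec_get_rectangle; infer_instance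

-- ===== CLAIM (what is proved, stated in full; the proofs are below) =====
def Claim_equal_get_rectangle : Prop := ∀ (width : Int) (height : Int), Dom_get_rectangle width height → Spec_get_rectangle width height (get_rectangle width height)

-- ===== LEMMAS AND PROOFS =====

-- After the k = 0 step, every later iteration of A's loop overwrites line3 with the same
-- fixed value and leaves line1 unchanged; so the fold over a list of nonzero indices
-- returns that value as soon as the list is nonempty.
theorem foldl_ne_zero (width height : Int) (l : List Int) (hne : ∀ k ∈ l, k ≠ 0)
    (l1 x : List Char) :
    (l.foldl
      (fun (st : List Char × List Char) k =>
        if k = 0 then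
          (st.1 ++ pyStrMul ['*'] width, st.2)
        else
          let line2 := pyStrMul (((['*'] ++ pyStrMul [' '] |width - 2|) ++ ['*']) ++ ['\n']) (height - 2)
          (st.1, ((st.1 ++ ['\n']) ++ line2) ++ st.1))
      (l1, x)) =
    (l1, if l.isEmpty then x
         else ((l1 ++ ['\n']) ++ pyStrMul (((['*'] ++ pyStrMul [' '] |width - 2|) ++ ['*']) ++ ['\n']) (height - 2)) ++ l1) := by
  induction l generalizing x with
  | nil => simp
  | cons k t ih =>
    have hk : k ≠ 0 := hne k (List.mem_cons_self ..)
    simp only [List.foldl_cons, if_neg hk]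
    rw [ih (fun j hj => hne j (List.mem_cons_of_mem _ hj))]
    simp

-- intercalate over a nonempty tail peels the head
theorem intercalate_cons_ne_nil (s a : List Char) (l : List (List Char)) (h : l ≠ []) :
    List.intercalate s (a :: l) = a ++ s ++ List.intercalate s l := by
  obtain ⟨b, t, rfl⟩ := List.exists_cons_of_ne_nil h
  simp [List.intercalate, List.flatten]

-- joining n equal middle rows and the bottom row with newlines is the flattened replicate
theorem intercalate_replicate (s I t2 : List Char) (n : Nat) :
    List.intercalate s (List.replicate n I ++ [t2]) = (List.replicate n (I ++ s)).flatten ++ t2 := by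
  induction n with
  | zero => simp [List.intercalate]
  | succ m ih =>
    rw [List.replicate_succ, List.cons_append,
      intercalate_cons_ne_nil _ _ _ (by simp), ih]
    simp [List.replicate_succ, List.append_assoc]

theorem get_rectangle_eq (width height : Int) :
    get_rectangle width height = get_rectangle_alt width height := by
  unfold get_rectangle get_rectangle_alt
  rcases lt_or_ge height 2 with h2 | h2
  · rcases lt_or_ge height 1 with h1 | h1
    · -- height ≤ 0 : empty range
      have : PySem.List.pyRange 0 height 1 = [] := by
        rw [PySem.List.pyRange_one]
        have h0 : (height - 0).toNat = 0 := by omega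
        rw [h0]; simp
      simp only [this, List.foldl_nil]
      rw [if_pos (by omega : height < 2)]
    · -- height = 1 : range is [0]
      have hh : height = 1 := by omega
      subst hh
      have : PySem.List.pyRange 0 1 1 = [0] := by
        rw [PySem.List.pyRange_one]; decide
      simp [this]
  · -- height ≥ 2
    -- A side
    have hcons : PySem.List.pyRange 0 height 1 = 0 :: PySem.List.pyRange 1 height 1 := by
      rw [PySem.List.pyRange_one_cons (by omega)]; norm_num
    have hne : ∀ k ∈ PySem.List.pyRange 1 height 1, k ≠ 0 := by
      intro k hk
      have := (PySem.List.mem_pyRange_one).1 hk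
      omega
    have hnonempty : (PySem.List.pyRange 1 height 1).isEmpty = false := by
      rw [List.isEmpty_eq_false_iff, ← List.length_pos_iff, PySem.List.length_pyRange_one]
      omega
    -- B side: split the tail row indices as middle ++ [height-1]
    have htail : PySem.List.pyRange 1 height 1 =
        PySem.List.pyRange 1 (height - 1) 1 ++ [height - 1] := by
      rw [PySem.List.pyRange_one_append 1 (height - 1) height (by omega) (by omega),
        PySem.List.pyRange_one_cons (by omega : height - 1 < height),
        PySem.List.pyRange_one_eq_nil (by omega : height ≤ height - 1 + 1)]
    have hmid : (PySem.List.pyRange 1 (height - 1) 1).map (rectRow width height) =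
        List.replicate (height - 2).toNat ('*' :: (pyStrMul [' '] |width - 2| ++ ['*'])) := by
      rw [List.eq_replicate_iff]
      constructor
      · rw [List.length_map, PySem.List.length_pyRange_one]; omega
      · intro b hb
        obtain ⟨r, hr, rfl⟩ := List.mem_map.1 hb
        have := (PySem.List.mem_pyRange_one).1 hr
        rw [rectRow, if_neg (by omega)]
    -- evaluate both sides
    simp only [hcons, List.foldl_cons]
    rw [foldl_ne_zero width height _ hne]
    simp only [hnonempty, Bool.false_eq_true, if_false]
    rw [if_neg (by omega : ¬ height < 2)]
    rw [htail]
    simp only [List.map_cons, List.map_append, List.map_cons, List.map_nil, hmid]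
    rw [rectRow, if_pos (Or.inl rfl), rectRow, if_pos (Or.inr rfl)]
    rw [intercalate_cons_ne_nil _ _ _ (by simp),
      intercalate_replicate]
    simp [pyStrMul, PySem.List.pyRepeat]

-- ===== VERDICT (by name: the statement is the Claim_ definition above) =====
theorem get_rectangle_spec : Claim_equal_get_rectangle := by
  intro width height _
  unfold Spec_get_rectangle
  exact get_rectangle_eq width height
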